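-- pv_equiv track=rewrite | github.com/Enjef/Algo | 1394 - Find Lucky Integer in an Array/1394 - Find Lucky Integer in an Array.py | findLucky_dict
-- ===== SOURCE A (Python) =====
-- from typing import List
--
-- def findLucky_dict(arr: List[int]) -> int:  # 11.62% 45.10%
--     num_map = {}
--     for num in arr:
--         num_map[num] = num_map.get(num, 0) + 1
--     x_max = -1
--     for key, value in num_map.items():
--         if key > x_max and key == value:
--             x_max = key
--     return x_max
-- ===== SOURCE B (Python) =====
-- def findLucky_dict(arr):
--     # sort a copy descending, scan equal runs, return the first value whose run length equals it
--     s = sorted(arr, reverse=True)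
--     if not s:
--         return -1
--     cur = s[0]
--     run = 1
--     for y in s[1:]:
--         if y == cur:
--             run += 1
--         elif cur == run:
--             return cur
--         else:
--             cur, run = y, 1
--     return cur if cur == run else -1
-- ===== Notes on version B (the rewrite author's own statement) =====
-- stated objective: alternative
-- what changed: Replaces the hash-map counting pass plus a max-tracking scan over the dict items with a descending sort of a copy of the input followed by a single run-length scan that returns early at the first (hence largest) value whose run length equals the value.
import Mathlib
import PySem

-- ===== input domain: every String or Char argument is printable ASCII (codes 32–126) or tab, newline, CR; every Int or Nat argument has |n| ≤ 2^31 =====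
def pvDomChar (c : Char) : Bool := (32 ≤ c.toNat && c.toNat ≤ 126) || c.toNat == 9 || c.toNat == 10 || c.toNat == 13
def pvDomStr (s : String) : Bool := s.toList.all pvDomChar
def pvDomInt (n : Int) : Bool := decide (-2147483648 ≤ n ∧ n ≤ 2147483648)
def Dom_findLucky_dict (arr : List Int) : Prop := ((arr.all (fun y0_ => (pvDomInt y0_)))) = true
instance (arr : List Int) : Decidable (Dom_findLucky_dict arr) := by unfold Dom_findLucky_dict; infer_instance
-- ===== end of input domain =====

-- B replaces A's hash-map counting + max-tracking items scan by a descending sort of a copy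
-- of the input and a single early-exit run-length scan (objective: alternative, not faster).


-- ===== PORT A =====
def findLucky_dict (arr : List Int) : Int :=
  let num_map : PySem.Dict Int Int :=
    arr.foldl (fun d num => d.insert num (d.getD num 0 + 1)) PySem.Dict.empty
  num_map.items.foldl
    (fun x_max kv => if kv.1 > x_max ∧ kv.1 = kv.2 then kv.1 else x_max) (-1)

-- ===== PORT B =====
-- the 'for y in s[1:]' loop with early return, state (cur, run)
def pvScan (cur run : Int) : List Int → Int
  | [] => if cur = run then cur else -1
  | y :: t =>
    if y = cur then pvScan cur (run + 1) t
    else if cur = run then cur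
    else pvScan y 1 t

def findLucky_dict_alt (arr : List Int) : Int :=
  match PySem.List.sorted arr (fun x => x) true with
  | [] => -1
  | x :: t => pvScan x 1 t

-- ===== PRECONDITION & SPEC =====
def Spec_findLucky_dict (arr : List Int) (out : Int) : Prop := out = findLucky_dict_alt arr
instance (arr : List Int) (out : Int) : Decidable (Spec_findLucky_dict arr out) := by unfold Spec_findLucky_dict; infer_instance

-- ===== CLAIM (what is proved, stated in full; the proofs are below) =====
def Claim_equal_findLucky_dict : Prop := ∀ (arr : List Int), Dom_findLucky_dict arr → Spec_findLucky_dict arr (findLucky_dict arr)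

-- ===== LEMMAS AND PROOFS =====

-- A equals the running max (init -1) over the distinct values that are lucky
theorem pvA_eq_foldl_max (arr : List Int) :
    findLucky_dict arr =
      ((PySem.Set.ofList arr).filter (fun x => decide ((List.count x arr : Int) = x))).foldl max (-1) := by
  unfold findLucky_dict
  rw [PySem.Dict.foldl_insert_getD_add_one_eq_counter]
  simp only [PySem.Dict.items_counter, List.foldl_map]
  rw [PySem.List.foldl_congr_mem _ _
    (fun acc k => if ((List.count k arr : Int) = k) then max acc k else acc) (-1)
    (by
      intro acc x _
      by_cases h : (List.count x arr : Int) = x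
      · simp only [h, and_true, if_true, gt_iff_lt]
        by_cases h2 : acc < x
        · simp [h2, max_eq_right (le_of_lt h2)]
        · simp [h2, max_eq_left (le_of_not_gt h2)]
      · simp [h, Ne.symm h])]
  rw [PySem.List.foldl_ite_eq_foldl_filter]

-- proof-side helper: the distinct values of a run-sorted list, one per run
def pvDistinct : List Int → List Int
  | [] => []
  | x :: t => x :: pvDistinct (t.dropWhile (· == x))
termination_by s => s.length
decreasing_by
  simpa using Nat.lt_succ_of_le (List.length_dropWhile_le _ t)

theorem pvDropWhile_head_false {p : Int → Bool} {l : List Int} {y : Int} {t : List Int}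
    (h : l.dropWhile p = y :: t) : p y = false := by
  induction l with
  | nil => simp at h
  | cons a l ih =>
    by_cases ha : p a
    · exact ih (by simpa [List.dropWhile, ha] using h)
    · simp only [List.dropWhile, ha] at h
      cases h
      simpa using ha

theorem pvMem_pvDistinct (s : List Int) (y : Int) : y ∈ pvDistinct s ↔ y ∈ s := by
  induction s using pvDistinct.induct with
  | case1 => simp [pvDistinct]
  | case2 x t ih =>
    rw [pvDistinct]
    simp only [List.mem_cons, ih]
    constructor
    · rintro (rfl | h)
      · exact .inl rfl
      · exact .inr ((List.dropWhile_sublist _).mem h)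
    · rintro (rfl | h)
      · exact .inl rfl
      · by_cases hyx : y = x
        · exact .inl hyx
        · refine .inr ?_
          have hsp := List.takeWhile_append_dropWhile (p := (· == x)) (l := t)
          rw [← hsp] at h
          rcases List.mem_append.mp h with h | h
          · exact absurd (by simpa using List.mem_takeWhile_imp h) hyx
          · exact h

-- in a descending list, everything after the head run is strictly below the head
theorem pvDropWhile_lt {x : Int} {t : List Int}
    (hdesc : (x :: t).Pairwise (fun a b => b ≤ a)) :
    ∀ z ∈ t.dropWhile (· == x), z < x := by
  obtain ⟨hle, hdesc'⟩ := List.pairwise_cons.mp hdesc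
  cases hrest : t.dropWhile (· == x) with
  | nil => simp
  | cons y r2 =>
    have hy : y ≠ x := by simpa using pvDropWhile_head_false hrest
    have hsub : (y :: r2).Sublist t := hrest ▸ List.dropWhile_sublist _
    have hylt : y < x := lt_of_le_of_ne (hle y (hsub.mem (by simp))) hy
    intro z hz
    rcases List.mem_cons.mp hz with rfl | hz
    · exact hylt
    · have hp := List.pairwise_cons.mp (hdesc'.sublist hsub)
      exact lt_of_le_of_lt (hp.1 z hz) hylt

theorem pvDistinct_strict_desc {s : List Int}
    (hdesc : s.Pairwise (fun a b => b ≤ a)) :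
    (pvDistinct s).Pairwise (fun a b => b < a) := by
  induction s using pvDistinct.induct with
  | case1 => simp [pvDistinct]
  | case2 x t ih =>
    rw [pvDistinct]
    have hdesc' : (t.dropWhile (· == x)).Pairwise (fun a b => b ≤ a) :=
      List.Pairwise.sublist ((List.dropWhile_sublist _).cons _) hdesc
    refine List.pairwise_cons.mpr ⟨?_, ih hdesc'⟩
    intro y hy
    exact pvDropWhile_lt hdesc y ((pvMem_pvDistinct _ _).mp hy)

-- the run-absorption step of the scan
theorem pvScan_run (r : List Int) (rest : List Int) (x run : Int)
    (hr : ∀ y ∈ r, y = x) :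
    pvScan x run (r ++ rest) = pvScan x (run + (r.length : Int)) rest := by
  induction r generalizing run with
  | nil => simp
  | cons a r' ih =>
    have ha : a = x := hr a (by simp)
    simp only [List.cons_append, pvScan, ha, if_true]
    rw [ih (run + 1) (fun y hy => hr y (List.mem_cons_of_mem a hy))]
    congr 1
    push_cast [List.length_cons]
    ring

-- the scan over a descending list returns the head of the lucky distinct values
theorem pvScan_spec (n : Nat) (s : List Int) (hn : s.length ≤ n)
    (hdesc : s.Pairwise (fun a b => b ≤ a)) :
    (match s with | [] => (-1 : Int) | x :: t => pvScan x 1 t)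
      = ((pvDistinct s).filter (fun v => decide ((List.count v s : Int) = v))).headD (-1) := by
  induction n generalizing s with
  | zero =>
    have : s = [] := List.length_eq_zero_iff.mp (Nat.le_zero.mp hn)
    subst this
    simp [pvDistinct]
  | succ n ih =>
    cases s with
    | nil => simp [pvDistinct]
    | cons x t =>
      show pvScan x 1 t = _
      have hsplit := List.takeWhile_append_dropWhile (p := (· == x)) (l := t)
      set r := t.takeWhile (· == x) with hr
      set rest := t.dropWhile (· == x) with hrest
      have hrx : ∀ y ∈ r, y = x := fun y hy => by simpa using List.mem_takeWhile_imp hy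
      have hlt : ∀ z ∈ rest, z < x := pvDropWhile_lt hdesc
      have hxnotin : x ∉ rest := fun hx => absurd (hlt x hx) (lt_irrefl x)
      have hcountx : List.count x (x :: t) = 1 + r.length := by
        rw [← hsplit, List.count_cons_self, List.count_append,
          List.count_eq_length.mpr (fun b hb => (hrx b hb).symm),
          List.count_eq_zero.mpr hxnotin]
        omega
      have hcount_rest : ∀ v ∈ rest, List.count v (x :: t) = List.count v rest := by
        intro v hv
        have hvx : v ≠ x := ne_of_lt (hlt v hv)
        have hvr : List.count v r = 0 := List.count_eq_zero.mpr (fun hvr => hvx (hrx v hvr))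
        rw [← hsplit]
        simp [List.count_append, hvr, Ne.symm hvx]
      have hscan : pvScan x 1 t = pvScan x (1 + (r.length : Int)) rest := by
        conv_lhs => rw [← hsplit]
        exact pvScan_run r rest x 1 hrx
      have hdistinct : pvDistinct (x :: t) = x :: pvDistinct rest := by
        rw [pvDistinct]
      have hdesc_rest : rest.Pairwise (fun a b => b ≤ a) :=
        List.Pairwise.sublist ((List.dropWhile_sublist _).cons _) hdesc
      have hlen : rest.length ≤ n := by
        have h1 := List.length_dropWhile_le (fun z => z == x) t
        have h2 : t.length ≤ n := by simpa using Nat.succ_le_succ_iff.mp hn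
        rw [hrest]
        omega
      have hih := ih rest hlen hdesc_rest
      have hcongr :
          (pvDistinct rest).filter (fun v => decide ((List.count v (x :: t) : Int) = v))
            = (pvDistinct rest).filter (fun v => decide ((List.count v rest : Int) = v)) := by
        apply List.filter_congr
        intro v hv
        rw [hcount_rest v ((pvMem_pvDistinct _ _).mp hv)]
      have hm : ((List.count x (x :: t) : Int) = x) ↔ (x = 1 + (r.length : Int)) := by
        rw [hcountx]
        push_cast
        omega
      rw [hscan, hdistinct]
      clear_value r rest
      by_cases hlucky : (List.count x (x :: t) : Int) = x
      · have hx : x = 1 + (r.length : Int) := hm.mp hlucky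
        simp only [List.filter_cons, hlucky, decide_true, if_true, List.headD_cons]
        cases rest with
        | nil =>
          simp only [pvScan]
          rw [if_pos hx]
        | cons y rest' =>
          have hyx : y ≠ x := ne_of_lt (hlt y (by simp))
          simp only [pvScan]
          rw [if_neg hyx, if_pos hx]
      · have hx : ¬ (x = 1 + (r.length : Int)) := fun h => hlucky (hm.mpr h)
        simp only [List.filter_cons, hlucky, decide_false, Bool.false_eq_true, if_false]
        rw [hcongr, ← hih]
        cases rest with
        | nil =>
          simp only [pvScan]
          rw [if_neg hx]
        | cons y rest' =>
          have hyx : y ≠ x := ne_of_lt (hlt y (by simp))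
          simp only [pvScan]
          rw [if_neg hyx, if_neg hx]

-- bridge: head of a descending list equals the running max over any permutation of it,
-- provided every element exceeds the initial value
theorem pvHeadD_eq_foldl_max (M F : List Int) (hperm : M.Perm F)
    (hdesc : M.Pairwise (fun a b => b ≤ a)) (hpos : ∀ x ∈ F, (-1 : Int) < x) :
    M.headD (-1) = F.foldl max (-1) := by
  cases M with
  | nil =>
    have : F = [] := (List.Perm.nil_eq hperm).symm
    simp [this]
  | cons m t =>
    have hmF : m ∈ F := hperm.mem_iff.mp (by simp)
    obtain ⟨hle, hall⟩ := PySem.List.le_foldl_max F (-1)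
    have hmem : F.foldl max (-1) ∈ F := by
      rcases PySem.List.foldl_max_mem F (-1) with h | h
      · exfalso; exact absurd (h ▸ hall m hmF) (not_le.mpr (hpos m hmF))
      · exact h
    have hmax_le : F.foldl max (-1) ≤ m := by
      have : F.foldl max (-1) ∈ m :: t := hperm.symm.mem_iff.mp hmem
      rcases List.mem_cons.mp this with h | h
      · simp_all
      · exact (List.pairwise_cons.mp hdesc).1 _ h
    have heq : F.foldl max (-1) = m := le_antisymm hmax_le (hall m hmF)
    simpa using heq.symm

-- ===== VERDICT (by name: the statement is the Claim_ definition above) =====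
theorem findLucky_dict_spec : Claim_equal_findLucky_dict := by
  intro arr _
  unfold Spec_findLucky_dict findLucky_dict_alt
  rw [pvA_eq_foldl_max]
  set s := PySem.List.sorted arr (fun x => x) true with hs
  have hperm_s : s.Perm arr := PySem.List.sorted_perm arr (fun x => x) true
  have hdesc : s.Pairwise (fun a b => b ≤ a) := PySem.List.sorted_pairwise_rev arr (fun x => x)
  have hcount : ∀ v, List.count v s = List.count v arr := fun v => hperm_s.count_eq v
  rw [pvScan_spec s.length s (le_refl _) hdesc]
  have hfilter_eq :
      (pvDistinct s).filter (fun v => decide ((List.count v s : Int) = v))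
        = (pvDistinct s).filter (fun v => decide ((List.count v arr : Int) = v)) := by
    apply List.filter_congr
    intro v _
    rw [hcount v]
  rw [hfilter_eq]
  refine (pvHeadD_eq_foldl_max _ _ ?_ ?_ ?_).symm
  · apply List.Perm.filter
    refine (List.perm_ext_iff_of_nodup ?_ (PySem.Set.nodup_ofList arr)).mpr ?_
    · exact (pvDistinct_strict_desc hdesc).imp ne_of_gt
    · intro a
      rw [pvMem_pvDistinct, PySem.Set.mem_ofList, hperm_s.mem_iff]
  · exact ((pvDistinct_strict_desc hdesc).imp le_of_lt).sublist List.filter_sublist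
  · intro x hx
    simp only [List.mem_filter, decide_eq_true_eq] at hx
    have hmem : x ∈ arr := (PySem.Set.mem_ofList _ _).mp hx.1
    have : 0 < List.count x arr := List.count_pos_iff.mpr hmem
    omega
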